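-- pv_equiv track=rewrite | github.com/ngraczykowski/iris-root | organization-name-agent/company_name/compare.py | term_variants
-- ===== SOURCE A (Python) =====
-- import itertools
-- from typing import Mapping, Set, Sequence, Tuple
--
-- def term_variants(term: str) -> Set[str]:
--     return {
--         term,
--         term + ".",
--         *(
--             " ".join(w).strip()
--             for w in itertools.product(
--                 *[
--                     (" ".join(t), "".join(t), ". ".join(t) + ".", ".".join(t) + ".")
--                     for t in term.split()
--                 ]
--             )
--         ),
--     }
-- ===== SOURCE B (Python) =====
-- def term_variants(term):
--     # Mixed-radix enumeration: each formatting choice is one base-4 digit per word;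
--     # decode a counter and render every combination directly from the characters,
--     # with no per-word variant tuples and no cartesian product machinery.
--     words = term.split()
--     result = {term, term + "."}
--     for k in range(4 ** len(words)):
--         pieces = []
--         d = k
--         for word in reversed(words):
--             idx = d % 4
--             d //= 4
--             dot = "." if idx >= 2 else ""
--             sep = " " if idx % 2 == 0 else ""
--             pieces.append(sep.join(c + dot for c in word))
--         result.add(" ".join(reversed(pieces)).strip())
--     return result
-- ===== Notes on version B (the rewrite author's own statement) =====
-- stated objective: alternative
-- what changed: Replaces itertools.product over precomputed per-word 4-variant tuples by a base-4 counter: each combination index is decoded digit by digit (one digit per word selecting dot/separator) and the string is rendered directly from the word's characters, with no variant tuples and no product machinery.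
import Mathlib
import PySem

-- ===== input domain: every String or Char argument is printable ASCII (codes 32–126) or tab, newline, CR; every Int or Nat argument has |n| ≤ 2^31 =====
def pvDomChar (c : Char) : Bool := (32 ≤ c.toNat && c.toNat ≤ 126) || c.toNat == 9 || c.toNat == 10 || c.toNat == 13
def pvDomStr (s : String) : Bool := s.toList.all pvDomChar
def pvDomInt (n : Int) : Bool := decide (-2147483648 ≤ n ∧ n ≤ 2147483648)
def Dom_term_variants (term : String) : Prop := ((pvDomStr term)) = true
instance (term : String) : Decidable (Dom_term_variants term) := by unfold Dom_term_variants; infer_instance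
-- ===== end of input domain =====

-- B replaces the cartesian product of precomputed per-word variant tuples by a base-4
-- counter: each combination is decoded from the counter's digits and rendered directly
-- from the word's characters (objective: alternative algorithm, same cost).

-- ===== PORT A =====
-- the four variant strings of one word (joins over the word's characters)
def pvWordVariants (t : String) : List String :=
  [PySem.Str.join " " (t.toList.map (fun c => String.ofList [c])),
   PySem.Str.join "" (t.toList.map (fun c => String.ofList [c])),
   PySem.Str.join ". " (t.toList.map (fun c => String.ofList [c])) ++ ".",
   PySem.Str.join "." (t.toList.map (fun c => String.ofList [c])) ++ "."]

-- itertools.product, in itertools order (last factor varies fastest)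
def pvProduct (lss : List (List String)) : List (List String) :=
  lss.foldr (fun ls acc => ls.flatMap (fun x => acc.map (x :: ·))) [[]]

def term_variants (term : String) : List String :=
  PySem.Set.ofList ([term, term ++ "."] ++
    (pvProduct ((PySem.Str.split₀ term).map pvWordVariants)).map
      (fun w => PySem.Str.strip (PySem.Str.join " " w)))

-- ===== PORT B =====
-- sep.join(c + dot for c in word), with dot/sep decided by the base-4 digit idx
def pvRender (idx : Int) (word : String) : String :=
  PySem.Str.join (if PySem.Int.mod idx 2 = 0 then " " else "")
    (word.toList.map (fun c => String.ofList [c] ++ (if 2 ≤ idx then "." else "")))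

-- one step of the digit-consuming loop: idx = d % 4; d //= 4; pieces.append(render)
def pvStep (st : Int × List String) (word : String) : Int × List String :=
  (PySem.Int.floordiv st.1 4, st.2 ++ [pvRender (PySem.Int.mod st.1 4) word])

def term_variants_alt (term : String) : List String :=
  let words := PySem.Str.split₀ term
  (PySem.List.pyRange 0 ((4 : Int) ^ words.length) 1).foldl
    (fun res k =>
      let st := words.reverse.foldl pvStep (k, [])
      PySem.Set.add res (PySem.Str.strip (PySem.Str.join " " st.2.reverse)))
    (PySem.Set.ofList [term, term ++ "."])

-- ===== PRECONDITION & SPEC =====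
def Spec_term_variants (term : String) (out : List String) : Prop := out = term_variants_alt term
instance (term : String) (out : List String) : Decidable (Spec_term_variants term out) := by unfold Spec_term_variants; infer_instance

-- ===== CLAIM (what is proved, stated in full; the proofs are below) =====
def Claim_equal_term_variants : Prop := ∀ (term : String), Dom_term_variants term → Spec_term_variants term (term_variants term)

-- ===== LEMMAS AND PROOFS =====

-- pure (Nat-level) description of B's digit decoding: the i-th word from the END
-- of ws is rendered with digit (m / 4^i) % 4
def pvDtuple : List String → Nat → List String
  | [], _ => []
  | x :: xs, m => pvRender (((m / 4 ^ xs.length) % 4 : Nat) : Int) x :: pvDtuple xs m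

theorem pv_ofList_append {α : Type} [BEq α] (l1 l2 : List α) :
    PySem.Set.ofList (l1 ++ l2) = PySem.Set.update (PySem.Set.ofList l1) l2 := by
  simp [PySem.Set.ofList, PySem.Set.update, List.foldl_append]

theorem pv_toList_ne_nil {s : String} (h : s.toList ≠ []) : s ≠ "" := by
  intro hs; subst hs; exact h (by simp)

theorem pv_toList_ne_nil' {s : String} (h : s ≠ "") : s.toList ≠ [] := by
  intro hs; exact h (String.toList_inj.mp (by simpa using hs))

-- split₀.go only ever pushes a nonempty (reversed) current word
theorem pv_go_ne_nil (s : List Char) : ∀ (cur : List Char) (acc : List (List Char)),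
    (∀ w ∈ acc, w ≠ []) → ∀ w ∈ PySem.Chars.split₀.go s cur acc, w ≠ [] := by
  induction s with
  | nil =>
      intro cur acc hacc w hw
      simp only [PySem.Chars.split₀.go] at hw
      split at hw
      · exact hacc w (List.mem_reverse.mp hw)
      · rcases List.mem_cons.mp (List.mem_reverse.mp hw) with h | h
        · subst h
          simp only [List.isEmpty_iff] at *
          simpa using ‹¬ cur = []›
        · exact hacc w h
  | cons c rest ih =>
      intro cur acc hacc w hw
      simp only [PySem.Chars.split₀.go] at hw
      split at hw
      · split at hw
        · exact ih [] acc hacc w hw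
        · refine ih [] (cur.reverse :: acc) ?_ w hw
          intro w' hw'
          rcases List.mem_cons.mp hw' with h | h
          · subst h
            simp only [List.isEmpty_iff] at *
            simpa using ‹¬ cur = []›
          · exact hacc w' h
      · exact ih (c :: cur) acc hacc w hw

-- words produced by split() are nonempty
theorem pv_split_word_ne_empty (s : String) : ∀ w ∈ PySem.Str.split₀ s, w ≠ "" := by
  intro w hw
  have : w.toList ∈ List.map String.toList (PySem.Str.split₀ s) := List.mem_map_of_mem hw
  rw [PySem.Str.split₀_map_toList] at this
  exact pv_toList_ne_nil (pv_go_ne_nil s.toList [] [] (by simp) w.toList this)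

-- a '.' appended to every character is the same as a '.' moved into the separator
theorem pv_join_dot (sep : List Char) (l : List Char) (h : l ≠ []) :
    PySem.Chars.join sep (l.map (fun c => [c, '.']))
      = PySem.Chars.join ('.' :: sep) (l.map (fun c => [c])) ++ ['.'] := by
  induction l with
  | nil => exact absurd rfl h
  | cons c l ih =>
      cases l with
      | nil => simp [PySem.Chars.join_singleton]
      | cons c' r =>
          simp only [List.map_cons] at ih ⊢
          rw [PySem.Chars.join_cons_cons, PySem.Chars.join_cons_cons, ih (by simp)]
          simp

theorem pv_render0 (w : String) :
    pvRender 0 w = PySem.Str.join " " (w.toList.map (fun c => String.ofList [c])) := by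
  unfold pvRender
  rw [if_pos (by decide), if_neg (by decide)]
  simp

theorem pv_render1 (w : String) :
    pvRender 1 w = PySem.Str.join "" (w.toList.map (fun c => String.ofList [c])) := by
  unfold pvRender
  rw [if_neg (by decide), if_neg (by decide)]
  simp

theorem pv_render_dot (w : String) (hw : w ≠ "") (sep : String) :
    PySem.Str.join sep (w.toList.map (fun c => String.ofList [c] ++ "."))
      = PySem.Str.join (String.ofList ('.' :: sep.toList))
          (w.toList.map (fun c => String.ofList [c])) ++ "." := by
  apply String.toList_inj.mp
  simp only [PySem.Str.toList_join, String.toList_append, List.map_map]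
  have h1 : (String.toList ∘ fun c => String.ofList [c] ++ ".") = fun c => [c, '.'] := by
    funext c; simp
  have h2 : (String.toList ∘ fun c => String.ofList [c]) = fun c => [c] := by
    funext c; simp
  rw [h1, h2, pv_join_dot sep.toList w.toList (pv_toList_ne_nil' hw)]
  simp

theorem pv_render2 (w : String) (hw : w ≠ "") :
    pvRender 2 w
      = PySem.Str.join ". " (w.toList.map (fun c => String.ofList [c])) ++ "." := by
  unfold pvRender
  rw [if_pos (by decide), if_pos (by decide), pv_render_dot w hw " "]
  congr 1

theorem pv_render3 (w : String) (hw : w ≠ "") :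
    pvRender 3 w
      = PySem.Str.join "." (w.toList.map (fun c => String.ofList [c])) ++ "." := by
  unfold pvRender
  rw [if_neg (by decide), if_pos (by decide), pv_render_dot w hw ""]
  congr 1

-- B's renderer produces exactly A's four variant strings, in digit order
theorem pv_render_variants (w : String) (hw : w ≠ "") :
    pvWordVariants w = [pvRender 0 w, pvRender 1 w, pvRender 2 w, pvRender 3 w] := by
  rw [pv_render0, pv_render1, pv_render2 w hw, pv_render3 w hw]
  rfl

-- B's folded loop, characterised: state after consuming ws (last word first)
theorem pv_fold_decode (ws : List String) : ∀ (m : Nat) (acc : List String),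
    ws.reverse.foldl pvStep ((m : Int), acc)
      = (((m / 4 ^ ws.length : Nat) : Int), acc ++ (pvDtuple ws m).reverse) := by
  induction ws with
  | nil => intro m acc; simp [pvDtuple]
  | cons x xs ih =>
      intro m acc
      rw [List.reverse_cons, List.foldl_append, ih m acc]
      simp only [List.foldl_cons, List.foldl_nil, pvStep, pvDtuple, List.reverse_cons]
      rw [Prod.mk.injEq]
      constructor
      · have h := PySem.Int.floordiv_natCast (m / 4 ^ xs.length) 4
        rw [show ((4:Nat):Int) = (4:Int) from by norm_num] at h
        rw [h, Nat.div_div_eq_div_mul, ← pow_succ]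
        simp [List.length_cons]
      · have h := PySem.Int.mod_natCast (m / 4 ^ xs.length) 4
        rw [show ((4:Nat):Int) = (4:Int) from by norm_num] at h
        rw [h]
        simp

-- the decoded tuple only depends on the counter modulo 4^|ws|
theorem pv_dtuple_shift (ws : List String) : ∀ (j r : Nat),
    pvDtuple ws (j * 4 ^ ws.length + r) = pvDtuple ws r := by
  induction ws with
  | nil => intro j r; simp [pvDtuple]
  | cons x xs ih =>
      intro j r
      simp only [pvDtuple, List.length_cons]
      have hd : (j * 4 ^ (xs.length + 1) + r) / 4 ^ xs.length % 4
          = r / 4 ^ xs.length % 4 := by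
        rw [show j * 4 ^ (xs.length + 1) + r = r + (j * 4) * 4 ^ xs.length from by ring,
          Nat.add_mul_div_right _ _ (Nat.pow_pos (by norm_num)),
          Nat.add_mul_mod_self_right]
      have ht : pvDtuple xs (j * 4 ^ (xs.length + 1) + r) = pvDtuple xs r := by
        rw [show j * 4 ^ (xs.length + 1) + r = (j * 4) * 4 ^ xs.length + r from by ring,
          ih]
      rw [hd, ht]

-- List.range (4*m) split into its four blocks
theorem pv_range_four_mul (m : Nat) :
    List.range (4 * m)
      = (List.range 4).flatMap (fun j => (List.range m).map (fun r => j * m + r)) := by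
  have e0 : (List.range m).map (fun r : Nat => 0 * m + r) = List.range m := by simp
  have e1 : (List.range m).map (fun r : Nat => 1 * m + r)
      = (List.range m).map (fun x => m + x) :=
    List.map_congr_left (fun a _ => by omega)
  have e2 : (List.range m).map (fun r : Nat => 2 * m + r)
      = (List.range m).map (fun x => m + m + x) :=
    List.map_congr_left (fun a _ => by omega)
  have e3 : (List.range m).map (fun r : Nat => 3 * m + r)
      = (List.range m).map (fun x => m + m + m + x) :=
    List.map_congr_left (fun a _ => by omega)
  rw [show 4 * m = m + m + m + m from by ring, List.range_add, List.range_add,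
    List.range_add, show List.range 4 = [0, 1, 2, 3] from by decide]
  simp only [List.flatMap_cons, List.flatMap_nil, List.append_nil, e0, e1, e2, e3,
    List.append_assoc]

-- the head digit of a block element
theorem pv_dtuple_block (x : String) (xs : List String) (j r : Nat) (hj : j < 4)
    (hr : r < 4 ^ xs.length) :
    pvDtuple (x :: xs) (j * 4 ^ xs.length + r) = pvRender (j : Int) x :: pvDtuple xs r := by
  simp only [pvDtuple]
  have hd : (j * 4 ^ xs.length + r) / 4 ^ xs.length % 4 = j := by
    rw [show j * 4 ^ xs.length + r = r + j * 4 ^ xs.length from by ring,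
      Nat.add_mul_div_right _ _ (Nat.pow_pos (by norm_num)),
      Nat.div_eq_of_lt hr, Nat.zero_add, Nat.mod_eq_of_lt hj]
  rw [hd, pv_dtuple_shift]

-- counter enumeration = itertools.product order
theorem pv_enum_eq_product (ws : List String) (h : ∀ w ∈ ws, w ≠ "") :
    (List.range (4 ^ ws.length)).map (pvDtuple ws)
      = pvProduct (ws.map pvWordVariants) := by
  induction ws with
  | nil => simp [pvDtuple, pvProduct]
  | cons x xs ih =>
      have hx : x ≠ "" := h x (by simp)
      have hxs : ∀ w ∈ xs, w ≠ "" := fun w hw => h w (by simp [hw])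
      have ihe := ih hxs
      have hblock : ∀ j : Nat, j < 4 →
          ((List.range (4 ^ xs.length)).map (fun r => j * 4 ^ xs.length + r)).map
              (pvDtuple (x :: xs))
            = ((List.range (4 ^ xs.length)).map (pvDtuple xs)).map
                (fun t => pvRender (j : Int) x :: t) := by
        intro j hj
        rw [List.map_map, List.map_map]
        apply List.map_congr_left
        intro r hr
        exact pv_dtuple_block x xs j r hj (List.mem_range.mp hr)
      rw [show 4 ^ (x :: xs).length = 4 * 4 ^ xs.length from by
          simp [List.length_cons, pow_succ]; ring,
        pv_range_four_mul, List.map_flatMap]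
      simp only [pvProduct, List.map_cons, List.foldr_cons] at ihe ⊢
      rw [← ihe, pv_render_variants x hx]
      rw [show List.range 4 = [0, 1, 2, 3] from by decide]
      simp only [List.flatMap_cons, List.flatMap_nil, List.append_nil]
      rw [hblock 0 (by norm_num), hblock 1 (by norm_num), hblock 2 (by norm_num),
        hblock 3 (by norm_num)]
      norm_num

-- fold over the same list with pointwise-equal step functions
theorem pv_foldl_fun_congr {α β : Type} (f g : α → β → α) (l : List β) (init : α)
    (h : ∀ a b, f a b = g a b) : l.foldl f init = l.foldl g init := by
  have hfg : f = g := funext fun a => funext (h a)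
  rw [hfg]

-- B's set, characterised as base updated with the product-ordered combinations
theorem pv_alt_eq (term : String) :
    term_variants_alt term
      = PySem.Set.update (PySem.Set.ofList [term, term ++ "."])
          ((pvProduct ((PySem.Str.split₀ term).map pvWordVariants)).map
            (fun w => PySem.Str.strip (PySem.Str.join " " w))) := by
  unfold term_variants_alt
  dsimp only
  have hws := pv_split_word_ne_empty term
  set ws := PySem.Str.split₀ term with hdef
  have hN : (((4:Int) ^ ws.length) - 0).toNat = 4 ^ ws.length := by
    rw [sub_zero, show ((4:Int) ^ ws.length) = ((4 ^ ws.length : Nat) : Int) from by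
      push_cast; ring, Int.toNat_natCast]
  rw [PySem.List.pyRange_one, hN, List.foldl_map]
  have hbody : ∀ (res : List String) (m : Nat),
      (fun res (k : Int) =>
        let st := ws.reverse.foldl pvStep (k, [])
        PySem.Set.add res (PySem.Str.strip (PySem.Str.join " " st.2.reverse))) res ((0:Int) + (m:Int))
      = PySem.Set.add res (PySem.Str.strip (PySem.Str.join " " (pvDtuple ws m))) := by
    intro res m
    simp only [zero_add]
    rw [pv_fold_decode ws m []]
    simp
  rw [show PySem.Set.update (PySem.Set.ofList [term, term ++ "."])
        ((pvProduct (ws.map pvWordVariants)).map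
          (fun w => PySem.Str.strip (PySem.Str.join " " w)))
      = ((pvProduct (ws.map pvWordVariants)).map
          (fun w => PySem.Str.strip (PySem.Str.join " " w))).foldl PySem.Set.add
          (PySem.Set.ofList [term, term ++ "."]) from rfl]
  rw [← pv_enum_eq_product ws hws, List.map_map, List.foldl_map]
  exact pv_foldl_fun_congr _ _ _ _ hbody

-- ===== VERDICT (by name: the statement is the Claim_ definition above) =====
theorem term_variants_spec : Claim_equal_term_variants := by
  intro term _
  unfold Spec_term_variants term_variants
  rw [pv_ofList_append, pv_alt_eq]
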